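-- pv_equiv track=rewrite | github.com/alswo1212/jungle_baekjoon | 프로그래머스/2/258711. 도넛과 막대 그래프/도넛과 막대 그래프.py | check_graph
-- ===== SOURCE A (Python) =====
-- def check_graph(start, graph):
--     stack = [start]
--     duple_cnt = 0
--     bundle = set()
--
--     while stack:
--         node = stack.pop()
--         if node in bundle:
--             duple_cnt += 1
--         bundle.add(node)
--         nexts = graph[node]
--         while nexts:
--             stack.append(nexts.pop())
--
--     if duple_cnt >= 2:
--         return 3
--     elif duple_cnt == 0:
--         return 2
--     return 1
-- ===== SOURCE B (Python) =====
-- def check_graph(start, graph):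
--     # Non-destructive traversal: collect the reachable set, then derive the
--     # duplicate-pop count arithmetically instead of counting during the walk.
--     # (Unlike A, this does not empty the adjacency lists of `graph`.)
--     seen = set()
--     stack = [start]
--     while stack:
--         v = stack.pop()
--         if v not in seen:
--             seen.add(v)
--             stack.extend(reversed(graph[v]))
--     edges = sum(len(graph[v]) for v in seen)
--     cnt = 1 + edges - len(seen)
--     if cnt >= 2:
--         return 3
--     elif cnt == 0:
--         return 2
--     return 1
-- ===== Notes on version B (the rewrite author's own statement) =====
-- stated objective: alternative
-- what changed: B keeps the graph immutable and guards the stack with a visited set instead of destructively emptying each adjacency list, and it derives the duplicate count at the end by the closed formula 1 + (total out-degree of visited nodes) - (number of visited nodes) instead of incrementing a counter on every re-popped node.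
import Mathlib
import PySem

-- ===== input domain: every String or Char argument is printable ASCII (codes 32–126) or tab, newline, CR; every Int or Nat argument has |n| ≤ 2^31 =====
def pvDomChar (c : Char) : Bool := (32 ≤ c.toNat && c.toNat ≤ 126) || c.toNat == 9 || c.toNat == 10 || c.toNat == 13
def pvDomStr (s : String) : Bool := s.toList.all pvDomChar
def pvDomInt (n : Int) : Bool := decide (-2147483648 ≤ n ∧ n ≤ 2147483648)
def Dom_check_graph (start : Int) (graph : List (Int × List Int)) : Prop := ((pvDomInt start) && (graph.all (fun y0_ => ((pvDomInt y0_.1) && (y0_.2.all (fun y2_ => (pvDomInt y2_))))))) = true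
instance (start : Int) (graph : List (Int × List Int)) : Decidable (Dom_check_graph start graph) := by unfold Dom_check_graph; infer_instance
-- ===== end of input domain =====

-- B keeps the graph immutable (A empties each adjacency list in place — the equivalence
-- proved here is about the RETURN value; A's mutation of `graph` is not mimicked by B)
-- and computes the duplicate count by a closed formula over the visited set.

-- shared helpers: first-match lookup on the association list modelling the Python dict
def pvLookup (g : List (Int × List Int)) (k : Int) : Option (List Int) :=
  match g with
  | [] => none
  | (a, v) :: rest => if a = k then some v else pvLookup rest k

def pvClassify (c : Int) : Int := if c ≥ 2 then 3 else if c = 0 then 2 else 1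

-- ===== PORT A =====
-- `graph[node]` being drained by `nexts.pop()` = the entry's list becomes []
def pvEmptyAt (g : List (Int × List Int)) (k : Int) : List (Int × List Int) :=
  match g with
  | [] => []
  | (a, v) :: rest => if a = k then (a, ([] : List Int)) :: rest else (a, v) :: pvEmptyAt rest k

def pvEdges (g : List (Int × List Int)) : Nat := (g.map (fun p => p.2.length)).sum

-- cited by pvLoopA's decreasing_by
theorem pvEdges_emptyAt (g : List (Int × List Int)) (k : Int) (v : List Int)
    (h : pvLookup g k = some v) : pvEdges (pvEmptyAt g k) + v.length = pvEdges g := by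
  induction g with
  | nil => simp [pvLookup] at h
  | cons p rest ih =>
    obtain ⟨a, w⟩ := p
    by_cases hak : a = k
    · simp [pvLookup, hak] at h
      simp [pvEmptyAt, hak, pvEdges, h]
      omega
    · simp [pvLookup, hak] at h
      have := ih h
      simp [pvEmptyAt, hak, pvEdges] at *
      omega

-- the stack is held top-at-head: `stack.pop()` = take the head; draining `nexts` with
-- `nexts.pop()` and pushing each element yields the new stack `nexts ++ rest`
def pvLoopA (g : List (Int × List Int)) (s : List Int) (cnt : Int) (bundle : PySem.Set Int) :
    Option Int :=
  match s with
  | [] => some (pvClassify cnt)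
  | node :: rest =>
    let cnt' := if node ∈ bundle then cnt + 1 else cnt
    let bundle' := PySem.Set.add bundle node
    match h : pvLookup g node with
    | none => none                                        -- KeyError
    | some nexts => pvLoopA (pvEmptyAt g node) (nexts ++ rest) cnt' bundle'
termination_by pvEdges g + s.length
decreasing_by
  have := pvEdges_emptyAt g node nexts h
  simp [List.length_append]
  omega

def check_graph (start : Int) (graph : List (Int × List Int)) : Int :=
  (pvLoopA graph [start] 0 PySem.Set.empty).getD 0        -- getD only reached outside Pre_

-- ===== PORT B =====
-- cited by pvLoopB's decreasing_by
theorem pvFilterLt {α : Type} (l : List α) (p q : α → Bool)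
    (himp : ∀ x, q x = true → p x = true) (x : α) (hx : x ∈ l) (hp : p x = true)
    (hq : q x = false) : (l.filter q).length < (l.filter p).length := by
  have hmono : ∀ (m : List α), (m.filter q).length ≤ (m.filter p).length := by
    intro m
    have h1 : m.filter q = (m.filter p).filter q := by
      rw [List.filter_filter]
      apply List.filter_congr
      intro z _
      cases hqz : q z with
      | true => simp [himp z hqz]
      | false => simp
    rw [h1]
    exact List.Sublist.length_le (List.filter_sublist (l := m.filter p))
  induction l with
  | nil => simp at hx
  | cons y ys ih =>
    rcases List.mem_cons.mp hx with rfl | hmem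
    · have := hmono ys
      simp [List.filter_cons, hp, hq]
      omega
    · have h2 := ih hmem
      by_cases hqy : q y = true
      · have hpy := himp y hqy
        simp [List.filter_cons, hpy, hqy]
        omega
      · by_cases hpy : p y = true <;>
          simp [List.filter_cons, hpy, hqy, Bool.not_eq_true] at * <;> omega

theorem pvLookup_mem_keys (g : List (Int × List Int)) (k : Int) (v : List Int)
    (h : pvLookup g k = some v) : ∃ p ∈ g, p.1 = k := by
  induction g with
  | nil => simp [pvLookup] at h
  | cons q rest ih =>
    obtain ⟨a, w⟩ := q
    by_cases hak : a = k
    · exact ⟨(a, w), by simp, hak⟩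
    · simp [pvLookup, hak] at h
      obtain ⟨p, hp, hpk⟩ := ih h
      exact ⟨p, by simp [hp], hpk⟩

def pvLoopB (g0 : List (Int × List Int)) (s : List Int) (seen : PySem.Set Int) :
    Option (PySem.Set Int) :=
  match s with
  | [] => some seen
  | v :: rest =>
    if v ∈ seen then pvLoopB g0 rest seen
    else
      match h : pvLookup g0 v with
      | none => none                                      -- KeyError
      | some nexts => pvLoopB g0 (nexts ++ rest) (PySem.Set.add seen v)
termination_by ((g0.filter (fun p => !decide (p.1 ∈ seen))).length, s.length)
decreasing_by
  · apply Prod.Lex.right; simp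
  · apply Prod.Lex.left
    obtain ⟨p, hp, hpk⟩ := pvLookup_mem_keys g0 v nexts h
    refine pvFilterLt g0 _ _ ?_ p hp ?_ ?_
    · intro x hx
      simp [PySem.Set.mem_add] at hx ⊢
      exact hx.1
    · simp [hpk]
      assumption
    · simp [hpk, PySem.Set.mem_add]

def check_graph_alt (start : Int) (graph : List (Int × List Int)) : Int :=
  match pvLoopB graph [start] PySem.Set.empty with
  | none => 0                                             -- only reached outside Pre_
  | some sf =>
    let edges : Nat := (sf.map (fun v => ((pvLookup graph v).getD []).length)).sum
    let cnt : Int := 1 + (edges : Int) - (sf.length : Int)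
    pvClassify cnt

-- ===== PRECONDITION & SPEC =====
-- Pre_ excludes exactly the inputs on which Python A raises KeyError: those where some
-- node reachable from start along the adjacency lists is not a key of graph.  It is
-- stated as a closed-form bounded edge-closure of {start} (graph.length+1 expansions
-- saturate, since each productive expansion reaches at least one new key), not as a
-- re-run of either traversal.
def pvReachStep (graph : List (Int × List Int)) (R : List Int) : List Int :=
  R ++ ((graph.filter (fun p => decide (p.1 ∈ R))).flatMap Prod.snd).filter
    (fun v => decide (v ∉ R))

def pvReach (graph : List (Int × List Int)) : Nat → List Int → List Int
  | 0, R => R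
  | n + 1, R => pvReach graph n (pvReachStep graph R)

def Pre_check_graph (start : Int) (graph : List (Int × List Int)) : Prop :=
  ∀ v ∈ pvReach graph (graph.length + 1) [start], v ∈ graph.map Prod.fst
instance (start : Int) (graph : List (Int × List Int)) : Decidable (Pre_check_graph start graph) := by
  unfold Pre_check_graph; infer_instance

def pvWitness_check_graph : Int × (List (Int × List Int)) := (2147483647, [(2147483647, [2147483647, 2147483647])])

def Spec_check_graph (start : Int) (graph : List (Int × List Int)) (out : Int) : Prop :=
  out = check_graph_alt start graph
instance (start : Int) (graph : List (Int × List Int)) (out : Int) : Decidable (Spec_check_graph start graph out) := by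
  unfold Spec_check_graph; infer_instance

-- ===== CLAIM (what is proved, stated in full; the proofs are below) =====
def Claim_equal_check_graph : Prop := ∀ (start : Int) (graph : List (Int × List Int)), Dom_check_graph start graph → Pre_check_graph start graph → Spec_check_graph start graph (check_graph start graph)

-- ===== LEMMAS AND PROOFS =====

-- weight of the not-yet-visited part of sf: out-degree in g0 of each element outside seen
def pvS (g0 : List (Int × List Int)) (seen sf : List Int) : Nat :=
  (sf.map (fun v => if v ∈ seen then 0 else ((pvLookup g0 v).getD []).length)).sum

theorem pvS_cons (g0 : List (Int × List Int)) (seen : List Int) (x : Int) (xs : List Int) :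
    pvS g0 seen (x :: xs)
      = (if x ∈ seen then 0 else ((pvLookup g0 x).getD []).length) + pvS g0 seen xs := by
  simp [pvS]

theorem pvLookup_emptyAt_ne (g : List (Int × List Int)) (node k : Int) (hne : k ≠ node) :
    pvLookup (pvEmptyAt g node) k = pvLookup g k := by
  induction g with
  | nil => rfl
  | cons p rest ih =>
    obtain ⟨a, w⟩ := p
    by_cases han : a = node
    · subst han
      have hak : ¬ a = k := fun h => hne h.symm
      simp [pvEmptyAt, pvLookup, hak]
    · by_cases hak : a = k <;> simp [pvEmptyAt, pvLookup, han, hak, ih, hne]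

theorem pvLookup_emptyAt_self (g : List (Int × List Int)) (node : Int) (v : List Int)
    (h : pvLookup g node = some v) :
    pvLookup (pvEmptyAt g node) node = some ([] : List Int) := by
  induction g with
  | nil => simp [pvLookup] at h
  | cons p rest ih =>
    obtain ⟨a, w⟩ := p
    by_cases han : a = node
    · simp [pvEmptyAt, pvLookup, han]
    · simp [pvLookup, han] at h
      simp [pvEmptyAt, pvLookup, han]
      exact ih h

theorem pvLoopB_mono (g0 : List (Int × List Int)) (s : List Int) (seen : PySem.Set Int) :
    ∀ sf, pvLoopB g0 s seen = some sf → ∀ x ∈ seen, x ∈ sf := by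
  induction s, seen using pvLoopB.induct g0 with
  | case1 seen =>
    intro sf hsf x hx
    rw [pvLoopB] at hsf
    injection hsf with h
    subst h; exact hx
  | case2 seen node rest hv ih =>
    intro sf hsf x hx
    rw [pvLoopB, if_pos hv] at hsf
    exact ih sf hsf x hx
  | case3 seen node rest hv hlk =>
    intro sf hsf x hx
    rw [pvLoopB, if_neg hv] at hsf
    split at hsf
    · simp at hsf
    · rename_i nexts1 heq
      rw [hlk] at heq
      simp at heq
  | case4 seen node rest hv nexts hlk ih =>
    intro sf hsf x hx
    rw [pvLoopB, if_neg hv] at hsf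
    split at hsf
    · simp at hsf
    · rename_i nexts1 heq
      rw [hlk] at heq
      injection heq with heq'
      subst heq'
      exact ih sf hsf x (by simp [PySem.Set.mem_add]; exact Or.inl hx)

theorem pvLoopB_nodup (g0 : List (Int × List Int)) (s : List Int) (seen : PySem.Set Int) :
    seen.Nodup → ∀ sf, pvLoopB g0 s seen = some sf → sf.Nodup := by
  induction s, seen using pvLoopB.induct g0 with
  | case1 seen =>
    intro hnd sf hsf
    rw [pvLoopB] at hsf
    injection hsf with h
    subst h; exact hnd
  | case2 seen node rest hv ih =>
    intro hnd sf hsf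
    rw [pvLoopB, if_pos hv] at hsf
    exact ih hnd sf hsf
  | case3 seen node rest hv hlk =>
    intro hnd sf hsf
    rw [pvLoopB, if_neg hv] at hsf
    split at hsf
    · simp at hsf
    · rename_i nexts1 heq
      rw [hlk] at heq
      simp at heq
  | case4 seen node rest hv nexts hlk ih =>
    intro hnd sf hsf
    rw [pvLoopB, if_neg hv] at hsf
    split at hsf
    · simp at hsf
    · rename_i nexts1 heq
      rw [hlk] at heq
      injection heq with heq'
      subst heq'
      exact ih (PySem.Set.nodup_add _ _ hnd) sf hsf

theorem pvS_of_subset (g0 : List (Int × List Int)) (seen sf : List Int)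
    (h : ∀ v ∈ sf, v ∈ seen) : pvS g0 seen sf = 0 := by
  induction sf with
  | nil => rfl
  | cons x xs ih =>
    have hx : x ∈ seen := h x (List.mem_cons_self)
    have ih' := ih (fun w hw => h w (List.mem_cons_of_mem _ hw))
    rw [pvS_cons, if_pos hx, ih']

theorem pvS_add (g0 : List (Int × List Int)) (seen : List Int) (node : Int) (sf : List Int)
    (hnd : sf.Nodup) (hmem : node ∈ sf) (hnot : node ∉ seen) :
    pvS g0 seen sf = pvS g0 (PySem.Set.add seen node) sf
      + ((pvLookup g0 node).getD []).length := by
  induction sf with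
  | nil => simp at hmem
  | cons x xs ih =>
    rcases List.mem_cons.mp hmem with h1 | h1
    · subst h1
      have hxs : node ∉ xs := (List.nodup_cons.mp hnd).1
      have hrest : pvS g0 (PySem.Set.add seen node) xs = pvS g0 seen xs := by
        unfold pvS
        congr 1
        apply List.map_congr_left
        intro w hw
        have hwv : ¬ (w = node) := fun h => hxs (h ▸ hw)
        simp [PySem.Set.mem_add, hwv]
      rw [pvS_cons, pvS_cons, hrest, if_neg hnot,
        if_pos (by simp [PySem.Set.mem_add] : node ∈ PySem.Set.add seen node)]
      omega
    · have hnd' := List.nodup_cons.mp hnd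
      have ihv := ih hnd'.2 h1
      by_cases hx : x ∈ seen
      · have hx' : x ∈ PySem.Set.add seen node := by
          simp [PySem.Set.mem_add]
          exact Or.inl hx
        rw [pvS_cons, pvS_cons, if_pos hx, if_pos hx', ihv]
        omega
      · have hxn : ¬ x = node := by
          rintro rfl
          exact hnd'.1 h1
        have hx' : x ∉ PySem.Set.add seen node := by
          simp [PySem.Set.mem_add]
          exact ⟨hx, hxn⟩
        rw [pvS_cons, pvS_cons, if_neg hx, if_neg hx', ihv]
        omega

theorem pvLen_add (seen : List Int) (node : Int) (hnot : node ∉ seen) :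
    (PySem.Set.add seen node).length = seen.length + 1 := by
  rw [PySem.Set.add_of_not_mem hnot]
  simp

-- the lock-step invariant: A's mutated graph g agrees with g0 outside `seen` and is
-- emptied on `seen`; A's remaining work then equals B's, up to the closed-form count
theorem pvMain (g0 : List (Int × List Int)) (g : List (Int × List Int)) (s : List Int)
    (cnt : Int) (seen : PySem.Set Int) :
    (∀ k : Int, pvLookup g k = if k ∈ seen then some ([] : List Int) else pvLookup g0 k) →
    seen.Nodup →
    pvLoopA g s cnt seen = (pvLoopB g0 s seen).map
      (fun sf => pvClassify (cnt + (s.length : Int) + (pvS g0 seen sf : Int)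
        - ((sf.length : Int) - (seen.length : Int)))) := by
  induction g, s, cnt, seen using pvLoopA.induct with
  | case1 g cnt seen =>
    intro hInv hnd
    rw [pvLoopA, pvLoopB]
    have h0 : pvS g0 seen seen = 0 := pvS_of_subset g0 seen seen (fun v hv => hv)
    simp [h0]
  | case2 g cnt seen node rest hlk =>
    intro hInv hnd
    have hInv' := hInv node
    rw [hlk] at hInv'
    by_cases hns : node ∈ seen
    · simp [hns] at hInv'
    · rw [if_neg hns] at hInv'
      rw [pvLoopA, pvLoopB]
      simp only [if_neg hns]
      split
      · split
        · simp
        · rename_i heq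
          rw [← hInv'] at heq
          simp at heq
      · exfalso
        rename_i heq
        rw [hlk] at heq
        simp at heq
  | case3 g cnt seen node rest cntE bndE nexts hlk ih =>
    intro hInv hnd
    simp only [cntE, bndE] at ih
    have hInv' := hInv node
    rw [hlk] at hInv'
    have hInv2 : ∀ k : Int, pvLookup (pvEmptyAt g node) k =
        if k ∈ PySem.Set.add seen node then some ([] : List Int) else pvLookup g0 k := by
      intro k
      by_cases hkn : k = node
      · subst hkn
        rw [pvLookup_emptyAt_self g k nexts hlk]
        simp [PySem.Set.mem_add]
      · rw [pvLookup_emptyAt_ne g node k hkn, hInv k]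
        simp [PySem.Set.mem_add, hkn]
    have hnd2 : (PySem.Set.add seen node).Nodup := PySem.Set.nodup_add _ _ hnd
    have ihr := ih hInv2 hnd2
    rw [pvLoopA, pvLoopB]
    split
    · rename_i heq
      rw [hlk] at heq
      simp at heq
    rename_i heq
    rw [hlk] at heq
    injection heq with heq'
    subst heq'
    by_cases hns : node ∈ seen
    · -- already visited: its list was emptied, A pops it and counts a duplicate
      rw [if_pos hns] at hInv'
      injection hInv' with hInv''
      subst hInv''
      have hb : PySem.Set.add seen node = seen := PySem.Set.add_of_mem hns
      rw [if_pos hns, hb, if_pos hns]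
      rw [dif_pos hns, hb] at ihr
      simp only [List.nil_append] at ihr ⊢
      rw [ihr]
      cases hB : pvLoopB g0 rest seen with
      | none => simp
      | some sf =>
        simp
        congr 1
        omega
    · -- first visit: A empties the entry, B adds to seen; same stack `nexts ++ rest`
      rw [if_neg hns] at hInv'
      rw [if_neg hns, if_neg hns]
      rw [dif_neg hns] at ihr
      split
      · rename_i heq2
        rw [← hInv'] at heq2
        simp at heq2
      rename_i heq2
      rw [← hInv'] at heq2
      injection heq2 with heq2'
      subst heq2'
      rw [ihr]
      cases hB : pvLoopB g0 (nexts ++ rest) (PySem.Set.add seen node) with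
      | none => simp
      | some sf =>
        have hmem : node ∈ sf :=
          pvLoopB_mono g0 (nexts ++ rest) (PySem.Set.add seen node) sf hB node
            (by simp [PySem.Set.mem_add])
        have hsfnd : sf.Nodup :=
          pvLoopB_nodup g0 (nexts ++ rest) (PySem.Set.add seen node) hnd2 sf hB
        have hS := pvS_add g0 seen node sf hsfnd hmem hns
        rw [← hInv'] at hS
        have hlen := pvLen_add seen node hns
        simp only [Option.getD_some] at hS
        simp
        congr 1
        omega

-- ===== VERDICT (by name: the statement is the Claim_ definition above) =====
theorem check_graph_spec : Claim_equal_check_graph := by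
  intro start graph _ _
  unfold Spec_check_graph check_graph check_graph_alt
  have h := pvMain graph graph [start] 0 PySem.Set.empty
    (by intro k; simp [PySem.Set.empty]) (by simp [PySem.Set.empty])
  rw [h]
  cases hB : pvLoopB graph [start] PySem.Set.empty with
  | none => simp
  | some sf =>
    have hS : pvS graph PySem.Set.empty sf
        = (sf.map (fun v => ((pvLookup graph v).getD []).length)).sum := by
      simp [pvS, PySem.Set.empty]
    simp only [Option.map_some, Option.getD_some]
    rw [hS]
    congr 1
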